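-- pv_equiv track=rewrite | github.com/zengzhishi/SourceCapture | capture/utils/capture_util.py | unbalanced_quotes
-- ===== SOURCE A (Python) =====
-- def unbalanced_quotes(s):
--     single = 0
--     double = 0
--     excute = 0
--     for c in s:
--         if c == "'":
--             single += 1
--         elif c == '"':
--             double += 1
--         if c == "`":
--             excute += 1
--
--     move_double = s.count('\\"')
--     move_single = s.count("\\'")
--     single -= move_single
--     double -= move_double
--
--     is_half_quote = single % 2 == 1 or double % 2 == 1 or excute % 2 == 1
--     return is_half_quote
-- ===== SOURCE B (Python) =====
-- def unbalanced_quotes(s):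
--     single_odd = False
--     double_odd = False
--     excute_odd = False
--     prev = ''
--     for c in s:
--         if c == "'" and prev != '\\':
--             single_odd = not single_odd
--         elif c == '"' and prev != '\\':
--             double_odd = not double_odd
--         if c == '`':
--             excute_odd = not excute_odd
--         prev = c
--     return single_odd or double_odd or excute_odd
-- ===== Notes on version B (the rewrite author's own statement) =====
-- stated objective: alternative
-- what changed: Replaces A's count-everything-then-subtract-escaped-counts arithmetic (a counting loop plus two extra s.count substring passes and % 2 tests) by a single escape-aware pass that tracks the previous character and flips one boolean parity flag per unescaped quote (and per backtick), returning the OR of the three flags.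
import Mathlib
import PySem

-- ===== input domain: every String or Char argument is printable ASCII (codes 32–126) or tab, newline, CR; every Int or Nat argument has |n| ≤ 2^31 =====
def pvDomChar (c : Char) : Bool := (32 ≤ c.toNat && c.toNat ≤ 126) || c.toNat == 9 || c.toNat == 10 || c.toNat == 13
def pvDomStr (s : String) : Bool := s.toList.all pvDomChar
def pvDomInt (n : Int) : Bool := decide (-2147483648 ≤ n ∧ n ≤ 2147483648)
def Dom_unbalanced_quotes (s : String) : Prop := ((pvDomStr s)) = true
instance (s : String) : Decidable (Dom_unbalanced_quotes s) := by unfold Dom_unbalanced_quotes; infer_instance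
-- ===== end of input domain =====

-- B replaces A's count-everything-then-subtract-escapes arithmetic by a single escape-aware
-- pass that tracks the previous character and keeps only three parity flags (alternative).

-- ===== PORT A =====
-- literal transliteration: the counting loop becomes a foldl over the characters with the
-- (single, double, excute) accumulator; s.count(sub) is PySem.Str.count; '%' is PySem.Int.mod.
def unbalanced_quotes (s : String) : Bool :=
  let st := s.toList.foldl
    (fun (acc : Int × Int × Int) c =>
      let acc1 :=
        if c == '\'' then (acc.1 + 1, acc.2.1, acc.2.2)
        else if c == '"' then (acc.1, acc.2.1 + 1, acc.2.2)
        else acc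
      if c == '`' then (acc1.1, acc1.2.1, acc1.2.2 + 1) else acc1)
    (0, 0, 0)
  let move_double : Int := (PySem.Str.count s "\\\"" : Int)
  let move_single : Int := (PySem.Str.count s "\\'" : Int)
  let single := st.1 - move_single
  let double := st.2.1 - move_double
  (PySem.Int.mod single 2 == 1) || (PySem.Int.mod double 2 == 1) || (PySem.Int.mod st.2.2 2 == 1)

-- ===== PORT B =====
-- literal transliteration of Source B: one pass with three parity flags and the previous character.
-- pvStepB is the body of Source B's for-loop; Python's prev = '' (no previous char yet) is none.
def pvStepB (acc : Bool × Bool × Bool × Option Char) (c : Char) : Bool × Bool × Bool × Option Char :=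
  let a1 :=
    if c == '\'' && !(acc.2.2.2 == some '\\') then (!acc.1, acc.2.1, acc.2.2.1, acc.2.2.2)
    else if c == '"' && !(acc.2.2.2 == some '\\') then (acc.1, !acc.2.1, acc.2.2.1, acc.2.2.2)
    else acc
  let a2 := if c == '`' then (a1.1, a1.2.1, !a1.2.2.1, a1.2.2.2) else a1
  (a2.1, a2.2.1, a2.2.2.1, some c)

def unbalanced_quotes_alt (s : String) : Bool :=
  let st := s.toList.foldl pvStepB (false, false, false, none)
  st.1 || st.2.1 || st.2.2.1

-- ===== PRECONDITION & SPEC =====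
def Spec_unbalanced_quotes (s : String) (out : Bool) : Prop := out = unbalanced_quotes_alt s
instance (s : String) (out : Bool) : Decidable (Spec_unbalanced_quotes s out) := by unfold Spec_unbalanced_quotes; infer_instance

-- ===== CLAIM (what is proved, stated in full; the proofs are below) =====
def Claim_equal_unbalanced_quotes : Prop := ∀ (s : String), Dom_unbalanced_quotes s → Spec_unbalanced_quotes s (unbalanced_quotes s)

-- ===== LEMMAS AND PROOFS =====

-- number of occurrences of q in l that are NOT preceded by a backslash (prev = char before l)
def pvUn (q : Char) : Option Char → List Char → Nat
  | _, [] => 0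
  | prev, h :: t => (if h = q ∧ prev ≠ some '\\' then 1 else 0) + pvUn q (some h) t

-- number of occurrences of q in l that ARE preceded by a backslash
def pvEsc (q : Char) : Option Char → List Char → Nat
  | _, [] => 0
  | prev, h :: t => (if h = q ∧ prev = some '\\' then 1 else 0) + pvEsc q (some h) t

lemma pvUn_add_pvEsc (q : Char) : ∀ (l : List Char) (prev : Option Char),
    pvUn q prev l + pvEsc q prev l = l.count q := by
  intro l
  induction l with
  | nil => intro prev; simp [pvUn, pvEsc]
  | cons h t ih =>
    intro prev
    simp only [pvUn, pvEsc, List.count_cons]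
    by_cases h1 : h = q <;> by_cases h2 : prev = some '\\' <;>
      simp [h1, h2, ← ih (some h)] <;> omega

lemma pvEsc_indep (q : Char) (l : List Char) (prev : Option Char) (hp : prev ≠ some '\\') :
    pvEsc q prev l = pvEsc q none l := by
  cases l with
  | nil => rfl
  | cons h t => simp [pvEsc, hp]

-- PySem.Chars.count of a backslash-q needle (q ≠ '\\') counts the q's preceded by a backslash:
-- occurrences cannot overlap, so non-overlapping search finds every adjacent pair.
lemma go_pair (q : Char) (hq : q ≠ '\\') : ∀ (fuel : Nat) (l : List Char) (acc : Nat),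
    l.length ≤ fuel →
    PySem.Chars.count.go ['\\', q] fuel l acc = acc + pvEsc q none l := by
  intro fuel
  induction fuel with
  | zero =>
    intro l acc hl
    have : l = [] := by cases l <;> simp_all
    subst this; simp [PySem.Chars.count.go, pvEsc]
  | succ f ih =>
    intro l acc hl
    cases l with
    | nil => simp [PySem.Chars.count.go, pvEsc]
    | cons h t =>
      by_cases hpre : List.isPrefixOf ['\\', q] (h :: t)
      · obtain ⟨h1, t', ht'⟩ : h = '\\' ∧ ∃ t', t = q :: t' := by
          cases t with
          | nil => simp [List.isPrefixOf] at hpre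
          | cons h2 r =>
            simp [List.isPrefixOf] at hpre
            exact ⟨hpre.1.symm, r, by rw [hpre.2]⟩
        subst h1; subst ht'
        rw [show PySem.Chars.count.go ['\\', q] (f+1) ('\\' :: q :: t') acc
            = PySem.Chars.count.go ['\\', q] f t' (acc+1) from by
          simp [PySem.Chars.count.go, hpre]]
        rw [ih t' (acc+1) (by simp at hl; omega)]
        have : pvEsc q none ('\\' :: q :: t') = 1 + pvEsc q none t' := by
          simp [pvEsc, pvEsc_indep q t' (some q) (by simp [hq])]
        rw [this]; omega
      · rw [show PySem.Chars.count.go ['\\', q] (f+1) (h :: t) acc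
            = PySem.Chars.count.go ['\\', q] f t acc from by
          simp only [PySem.Chars.count.go]
          simp [hpre]]
        rw [ih t acc (by simp at hl; omega)]
        by_cases hb : h = '\\'
        · subst hb
          cases t with
          | nil => simp [pvEsc]
          | cons h2 r =>
            have h2q : h2 ≠ q := by
              intro he; apply hpre; simp [List.isPrefixOf, he]
            simp [pvEsc, h2q]
        · simp [pvEsc, pvEsc_indep q t (some h) (by simp [hb])]

-- A's counting loop computes the three character counts.
lemma loop_counts : ∀ (l : List Char) (a b e : Int),
    l.foldl
      (fun (acc : Int × Int × Int) c =>
        let acc1 :=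
          if c == '\'' then (acc.1 + 1, acc.2.1, acc.2.2)
          else if c == '"' then (acc.1, acc.2.1 + 1, acc.2.2)
          else acc
        if c == '`' then (acc1.1, acc1.2.1, acc1.2.2 + 1) else acc1)
      (a, b, e)
    = (a + l.count '\'', b + l.count '"', e + l.count '`') := by
  intro l
  induction l with
  | nil => simp
  | cons h t ih =>
    intro a b e
    by_cases h1 : h = '\''
    · subst h1
      show List.foldl _ (a + 1, b, e) t = _
      rw [ih]
      simp [Prod.ext_iff]
      omega
    · by_cases h2 : h = '"'
      · subst h2
        show List.foldl _ (a, b + 1, e) t = _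
        rw [ih]
        simp [Prod.ext_iff]
        omega
      · by_cases h3 : h = '`'
        · subst h3
          show List.foldl _ (a, b, e + 1) t = _
          rw [ih]
          simp [Prod.ext_iff]
          omega
        · simp only [List.foldl_cons]
          split_ifs <;> simp_all

def pvOddb (n : Nat) : Bool := n % 2 == 1

lemma pvOddb_succ (n : Nat) : pvOddb (1 + n) = !pvOddb n := by
  simp only [pvOddb]
  rcases Nat.mod_two_eq_zero_or_one n with h | h <;> simp [Nat.add_mod, h]

-- B's loop toggles exactly the parities of the unescaped-quote counts (and all backticks).
lemma loopB_parities : ∀ (l : List Char) (prev : Option Char) (ps pd pe : Bool),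
    (l.foldl pvStepB (ps, pd, pe, prev)).1 = (ps.xor (pvOddb (pvUn '\'' prev l)))
    ∧ (l.foldl pvStepB (ps, pd, pe, prev)).2.1 = (pd.xor (pvOddb (pvUn '"' prev l)))
    ∧ (l.foldl pvStepB (ps, pd, pe, prev)).2.2.1 = (pe.xor (pvOddb (l.count '`'))) := by
  intro l
  induction l with
  | nil => intro prev ps pd pe; simp [pvUn, pvOddb]
  | cons h t ih =>
    intro prev ps pd pe
    simp only [List.foldl_cons, List.count_cons]
    by_cases hq : h = '\'' ∧ prev ≠ some '\\'
    · obtain ⟨h1, h2⟩ := hq; subst h1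
      rw [show pvStepB (ps, pd, pe, prev) '\'' = (!ps, pd, pe, some '\'') from by
        simp [pvStepB, h2]]
      obtain ⟨i1, i2, i3⟩ := ih (some '\'') (!ps) pd pe
      refine ⟨?_, ?_, ?_⟩
      · rw [i1]; simp [pvUn, h2, pvOddb_succ]
      · rw [i2]; simp [pvUn, h2]
      · rw [i3]; simp
    · by_cases hd : h = '"' ∧ prev ≠ some '\\'
      · obtain ⟨h1, h2⟩ := hd; subst h1
        rw [show pvStepB (ps, pd, pe, prev) '"' = (ps, !pd, pe, some '"') from by
          simp [pvStepB, h2]]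
        obtain ⟨i1, i2, i3⟩ := ih (some '"') ps (!pd) pe
        refine ⟨?_, ?_, ?_⟩
        · rw [i1]; simp [pvUn, h2]
        · rw [i2]; simp [pvUn, h2, pvOddb_succ]
        · rw [i3]; simp
      · by_cases hb : h = '`'
        · subst hb
          rw [show pvStepB (ps, pd, pe, prev) '`' = (ps, pd, !pe, some '`') from by
            simp [pvStepB]]
          obtain ⟨i1, i2, i3⟩ := ih (some '`') ps pd (!pe)
          refine ⟨?_, ?_, ?_⟩
          · rw [i1]; simp [pvUn]
          · rw [i2]; simp [pvUn]
          · rw [i3]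
            rcases Nat.mod_two_eq_zero_or_one (List.count '`' t) with h | h <;>
              cases pe <;> simp [pvOddb, Nat.add_mod, h]
        · simp only [not_and, not_not] at hq hd
          rw [show pvStepB (ps, pd, pe, prev) h = (ps, pd, pe, some h) from by
            by_cases h1 : h = '\''
            · subst h1; simp [pvStepB, hq rfl]
            · by_cases h2 : h = '"'
              · subst h2; simp [pvStepB, hd rfl]
              · simp [pvStepB, h1, h2, hb]]
          obtain ⟨i1, i2, i3⟩ := ih (some h) ps pd pe
          refine ⟨?_, ?_, ?_⟩
          · rw [i1]
            by_cases h1 : h = '\''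
            · subst h1; simp [pvUn, hq rfl]
            · simp [pvUn, h1]
          · rw [i2]
            by_cases h2 : h = '"'
            · subst h2; simp [pvUn, hd rfl]
            · simp [pvUn, h2]
          · rw [i3]; try simp [hb]

lemma pvMod_two (u : Nat) : (PySem.Int.mod (u : Int) 2 == 1) = pvOddb u := by
  have hf : Int.fmod (u : Int) 2 = ((u % 2 : Nat) : Int) := by
    rw [Int.fmod_eq_emod]; simp
  simp only [PySem.Int.mod, hf, pvOddb]
  rcases Nat.mod_two_eq_zero_or_one u with h | h <;> simp [h]

-- ===== VERDICT (by name: the statement is the Claim_ definition above) =====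
theorem unbalanced_quotes_spec : Claim_equal_unbalanced_quotes := by
  intro s _
  unfold Spec_unbalanced_quotes unbalanced_quotes unbalanced_quotes_alt
  obtain ⟨b1, b2, b3⟩ := loopB_parities s.toList none false false false
  simp only [loop_counts s.toList 0 0 0, PySem.Str.count_eq, b1, b2, b3]
  rw [show ("\\'" : String).toList = ['\\', '\''] from rfl,
      show ("\\\"" : String).toList = ['\\', '"'] from rfl]
  have c1 : PySem.Chars.count s.toList ['\\', '\''] = pvEsc '\'' none s.toList := by
    have := go_pair '\'' (by decide) s.toList.length s.toList 0 le_rfl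
    simpa [PySem.Chars.count] using this
  have c2 : PySem.Chars.count s.toList ['\\', '"'] = pvEsc '"' none s.toList := by
    have := go_pair '"' (by decide) s.toList.length s.toList 0 le_rfl
    simpa [PySem.Chars.count] using this
  rw [c1, c2]
  have e1 : (0 + (s.toList.count '\'' : Int)) - (pvEsc '\'' none s.toList : Int)
      = (pvUn '\'' none s.toList : Int) := by
    have := pvUn_add_pvEsc '\'' s.toList none
    push_cast [← this]; ring
  have e2 : (0 + (s.toList.count '"' : Int)) - (pvEsc '"' none s.toList : Int)
      = (pvUn '"' none s.toList : Int) := by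
    have := pvUn_add_pvEsc '"' s.toList none
    push_cast [← this]; ring
  simp only [e1, e2]
  rw [show (0 + (s.toList.count '`' : Int)) = ((s.toList.count '`' : Nat) : Int) by ring]
  rw [pvMod_two, pvMod_two, pvMod_two]
  simp
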